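-- pv_equiv track=rewrite | github.com/daedalus/libciphers | src/libciphers/__init__.py | find_key_pattern
-- ===== SOURCE A (Python) =====
-- def find_key_pattern(key_needed_at_pos: dict, max_len: int = 30) -> list:
--     """Find repeating key pattern from required key positions"""
--     patterns = []
--     for L in range(1, max_len + 1):
--         key_chars = [None] * L
--         possible = True
--
--         for pos, needed_char in key_needed_at_pos.items():
--             if needed_char:
--                 pos_in_key = pos % L
--                 if key_chars[pos_in_key] is None:
--                     key_chars[pos_in_key] = needed_char
--                 elif key_chars[pos_in_key] != needed_char:
--                     possible = False
--                     break
--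
--         if possible and all(k is not None for k in key_chars):
--             patterns.append("".join(key_chars))
--
--     return patterns
-- ===== SOURCE B (Python) =====
-- def find_key_pattern(key_needed_at_pos: dict, max_len: int = 30) -> list:
--     """Pairwise-conflict test: precompute, once, the position differences of every
--     pair of required chars that disagree; a length L admits a repeating key iff no
--     conflicting difference is divisible by L and every residue class (mod L) is
--     hit; the pattern is then read off one representative per residue."""
--     entries = [(p, c) for p, c in key_needed_at_pos.items() if c]
--     conflicts = [p1 - p2
--                  for i, (p1, c1) in enumerate(entries)
--                  for p2, c2 in entries[i + 1:]
--                  if c1 != c2]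
--     patterns = []
--     for L in range(1, max_len + 1):
--         if any(d % L == 0 for d in conflicts):
--             continue
--         chars = []
--         for r in range(L):
--             c = next((c for p, c in entries if p % L == r), None)
--             if c is None:
--                 break
--             chars.append(c)
--         else:
--             patterns.append("".join(chars))
--     return patterns
-- ===== Notes on version B (the rewrite author's own statement) =====
-- stated objective: alternative
-- what changed: A incrementally places each required char into a per-length slot array, breaking on the first conflict and then checking the array is full; B never builds per-length state: it filters the truthy entries once, precomputes in a single pairwise pass the position differences of every two disagreeing chars, accepts a length L iff no such conflict difference is divisible by L, and then reads the pattern off by looking up, for each residue, the first entry hitting it.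
import Mathlib
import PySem

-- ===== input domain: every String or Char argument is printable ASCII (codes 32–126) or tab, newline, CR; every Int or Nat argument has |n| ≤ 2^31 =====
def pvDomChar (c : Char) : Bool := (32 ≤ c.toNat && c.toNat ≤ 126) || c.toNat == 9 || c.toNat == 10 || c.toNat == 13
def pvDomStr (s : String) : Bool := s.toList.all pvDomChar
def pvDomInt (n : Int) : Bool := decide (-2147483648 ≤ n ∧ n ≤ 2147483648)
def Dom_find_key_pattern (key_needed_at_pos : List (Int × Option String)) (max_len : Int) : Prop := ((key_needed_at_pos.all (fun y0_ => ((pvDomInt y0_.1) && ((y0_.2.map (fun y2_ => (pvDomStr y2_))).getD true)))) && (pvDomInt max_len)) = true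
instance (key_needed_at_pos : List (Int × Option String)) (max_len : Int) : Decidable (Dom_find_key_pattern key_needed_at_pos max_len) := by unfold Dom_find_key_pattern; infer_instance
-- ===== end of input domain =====

-- B replaces A's incremental slot-array placement (with early break) by a one-off
-- pairwise conflict-difference scan over the truthy entries (L valid iff no conflicting
-- difference is divisible by L) plus a per-residue representative lookup; same return value.

-- ===== PORT A =====
-- inner 'for pos, needed_char in … .items()' loop of A, with its early break on conflict
def fkpScan (L : Int) : List (Int × Option String) → List (Option String) → (List (Option String) × Bool)
  | [], key_chars => (key_chars, true)
  | item :: rest, key_chars =>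
    match item.2 with
    | none => fkpScan L rest key_chars          -- 'if needed_char:' falsy (None)
    | some s =>
      if s == "" then fkpScan L rest key_chars  -- 'if needed_char:' falsy ("")
      else
        let pos_in_key := PySem.Int.mod item.1 L
        match PySem.List.pyGetD key_chars pos_in_key none with
        | none => fkpScan L rest (PySem.List.pySetD key_chars pos_in_key (some s))
        | some d => if d == s then fkpScan L rest key_chars else (key_chars, false)

def find_key_pattern (key_needed_at_pos : List (Int × Option String)) (max_len : Int) : List String :=
  -- the parameter is a Python dict: '.items()' iterates its unique keys in insertion order
  (PySem.List.pyRange 1 (max_len + 1) 1).foldl (fun patterns L =>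
    let res := fkpScan L (PySem.Dict.ofList key_needed_at_pos).items (List.replicate L.toNat none)   -- [None] * L
    if res.2 && res.1.all (fun k => k.isSome) then
      patterns ++ [PySem.Str.join "" (res.1.map (fun k => k.getD ""))]
    else patterns) []

-- ===== PORT B =====
-- 'conflicts': each entry paired with the entries after it (entries[i+1:]), keeping the
-- position difference whenever the two required chars disagree
def fkpConflicts : List (Int × String) → List Int
  | [] => []
  | (p1, c1) :: rest =>
    rest.filterMap (fun q => if c1 == q.2 then none else some (p1 - q.1)) ++ fkpConflicts rest

-- 'for r in range(L): next((c for p, c in entries if p % L == r), None)' with break/else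
def fkpCollect (entries : List (Int × String)) (L : Int) : List Int → Option (List String)
  | [] => some []
  | r :: rs =>
    match entries.find? (fun pc => PySem.Int.mod pc.1 L == r) with
    | none => none
    | some pc => (fkpCollect entries L rs).map (fun cs => pc.2 :: cs)

def find_key_pattern_alt (key_needed_at_pos : List (Int × Option String)) (max_len : Int) : List String :=
  -- 'entries = [(p, c) for p, c in key_needed_at_pos.items() if c]' (dict: unique keys, insertion order)
  let entries := (PySem.Dict.ofList key_needed_at_pos).items.filterMap (fun pc =>
    match pc.2 with
    | none => none                              -- 'if c:' falsy (None)
    | some c => if c == "" then none else some (pc.1, c))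
  let conflicts := fkpConflicts entries
  (PySem.List.pyRange 1 (max_len + 1) 1).foldl (fun patterns L =>
    if conflicts.any (fun d => PySem.Int.mod d L == 0) then patterns   -- 'continue'
    else
      match fkpCollect entries L (PySem.List.pyRange 0 L 1) with
      | some chars => patterns ++ [PySem.Str.join "" chars]
      | none => patterns) []

-- ===== PRECONDITION & SPEC =====
def Spec_find_key_pattern (key_needed_at_pos : List (Int × Option String)) (max_len : Int) (out : List String) : Prop := out = find_key_pattern_alt key_needed_at_pos max_len
instance (key_needed_at_pos : List (Int × Option String)) (max_len : Int) (out : List String) : Decidable (Spec_find_key_pattern key_needed_at_pos max_len out) := by unfold Spec_find_key_pattern; infer_instance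

-- ===== CLAIM (what is proved, stated in full; the proofs are below) =====
def Claim_equal_find_key_pattern : Prop := ∀ (key_needed_at_pos : List (Int × Option String)) (max_len : Int), Dom_find_key_pattern key_needed_at_pos max_len → Spec_find_key_pattern key_needed_at_pos max_len (find_key_pattern key_needed_at_pos max_len)

-- ===== LEMMAS AND PROOFS =====

-- merge a possibly already-placed char with the remaining required chars of one residue class:
-- some o = the class is consistent and ends holding o; none = conflict (A's break)
def fkpMerge : Option String → List String → Option (Option String)
  | o, [] => some o
  | none, c :: t => fkpMerge (some c) t
  | some d, c :: t => if d = c then fkpMerge (some d) t else none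

theorem fkpMerge_some (c : String) (l : List String) :
    fkpMerge (some c) l = if l.all (fun x => x == c) then some (some c) else none := by
  induction l with
  | nil => simp [fkpMerge]
  | cons x t ih =>
    simp only [fkpMerge, List.all_cons]
    by_cases h : c = x
    · subst h; simpa using ih
    · simp [h, Ne.symm h, beq_iff_eq]

theorem fkpMerge_none_cons (c : String) (t : List String) :
    fkpMerge none (c :: t) = if t.all (fun x => x == c) then some (some c) else none := by
  simpa [fkpMerge] using fkpMerge_some c t

-- the chars required at residue r when the key has length L (one residue class, in order)
def fkpChars (items : List (Int × Option String)) (L r : Int) : List String :=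
  items.filterMap (fun pc =>
    match pc.2 with
    | none => none
    | some c => if c == "" then none else if PySem.Int.mod pc.1 L = r then some c else none)

-- B's truthy-entry comprehension
def fkpEntries (items : List (Int × Option String)) : List (Int × String) :=
  items.filterMap (fun pc =>
    match pc.2 with
    | none => none
    | some c => if c == "" then none else some (pc.1, c))

-- the residue class read off the filtered entries
def fkpCls (entries : List (Int × String)) (L r : Int) : List String :=
  entries.filterMap (fun pc => if PySem.Int.mod pc.1 L = r then some pc.2 else none)

theorem fkpChars_eq_cls (items : List (Int × Option String)) (L r : Int) :
    fkpChars items L r = fkpCls (fkpEntries items) L r := by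
  induction items with
  | nil => rfl
  | cons a t ih =>
    obtain ⟨p, oc⟩ := a
    cases oc with
    | none => simpa [fkpChars, fkpEntries, fkpCls, List.filterMap_cons] using ih
    | some c =>
      by_cases hc : c = ""
      · simpa [fkpChars, fkpEntries, fkpCls, List.filterMap_cons, hc] using ih
      · by_cases hr : PySem.Int.mod p L = r
        · simpa [fkpChars, fkpEntries, fkpCls, List.filterMap_cons, hc, hr] using ih
        · simpa [fkpChars, fkpEntries, fkpCls, List.filterMap_cons, hc, hr] using ih

-- every list equals the range-indexed map of its getD reads
theorem fkpList_eq_map_range {α : Type} (xs : List α) (d : α) :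
    (List.range xs.length).map (fun k => xs.getD k d) = xs := by
  apply List.ext_getElem
  · simp
  · intro i h1 h2
    simp [List.getD_eq_getElem?_getD, List.getElem?_eq_getElem h2]

-- reads of the all-None initial array
theorem fkpGet_replicate {α : Type} (n k : Nat) (x d : α) (h : k < n) :
    PySem.List.pyGetD (List.replicate n x) (k : Int) d = x := by
  rw [PySem.List.pyGetD_eq_getElem _ d (by positivity) (by simpa using h)]
  simp

-- unfolding fkpChars over one item
theorem fkpChars_cons_none (p : Int) (rest : List (Int × Option String)) (L r : Int) :
    fkpChars ((p, none) :: rest) L r = fkpChars rest L r := by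
  simp [fkpChars]

theorem fkpChars_cons_empty (p : Int) (rest : List (Int × Option String)) (L r : Int) (s : String)
    (hs : s = "") :
    fkpChars ((p, some s) :: rest) L r = fkpChars rest L r := by
  simp [fkpChars, hs]

theorem fkpChars_cons_char (p : Int) (rest : List (Int × Option String)) (L r : Int) (s : String)
    (hs : s ≠ "") :
    fkpChars ((p, some s) :: rest) L r =
      if PySem.Int.mod p L = r then s :: fkpChars rest L r else fkpChars rest L r := by
  simp only [fkpChars, List.filterMap_cons, beq_iff_eq, if_neg hs]
  by_cases h : PySem.Int.mod p L = r
  · simp [h]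
  · simp [h]

-- the characterisation of A's inner scan, by one induction over the items
theorem fkpScan_spec (L : Int) (hL : 0 < L) :
    ∀ (items : List (Int × Option String)) (kc : List (Option String)),
      kc.length = L.toNat →
      (((fkpScan L items kc).2 = true ↔
        ∀ k : Nat, k < L.toNat →
          fkpMerge (PySem.List.pyGetD kc (k : Int) none) (fkpChars items L (k : Int)) ≠ none) ∧
       ((fkpScan L items kc).2 = true →
        (fkpScan L items kc).1 = (List.range L.toNat).map (fun (k : Nat) =>
          (fkpMerge (PySem.List.pyGetD kc (k : Int) none) (fkpChars items L (k : Int))).getD none))) := by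
  intro items
  induction items with
  | nil =>
    intro kc hlen
    constructor
    · simp [fkpScan, fkpChars, fkpMerge]
    · intro _
      show kc = _
      conv_lhs => rw [← fkpList_eq_map_range kc none]
      rw [← hlen]
      apply List.map_congr_left
      intro k hk
      simp [fkpChars, fkpMerge]
  | cons item rest ih =>
    intro kc hlen
    obtain ⟨p, oc⟩ := item
    cases oc with
    | none =>
      simpa only [fkpScan, fkpChars_cons_none] using ih kc hlen
    | some s =>
      by_cases hs : (s == "") = true
      · have hih := ih kc hlen
        have hscan : fkpScan L ((p, some s) :: rest) kc = fkpScan L rest kc := by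
          simp [fkpScan, hs]
        constructor
        · rw [hscan, hih.1]
          exact forall_congr' fun k => forall_congr' fun hk => by
            rw [fkpChars_cons_empty _ _ _ _ _ (by simpa using hs)]
        · intro h2
          rw [hscan] at h2 ⊢
          rw [hih.2 h2]
          exact List.map_congr_left fun k _ => by rw [fkpChars_cons_empty _ _ _ _ _ (by simpa using hs)]
      · have hs' : (s == "") = false := by simpa using hs
        have h0 : 0 ≤ PySem.Int.mod p L := PySem.Int.mod_nonneg p hL
        have h1 : PySem.Int.mod p L < L := PySem.Int.mod_lt p hL
        have hcast : (((PySem.Int.mod p L).toNat : Nat) : Int) = PySem.Int.mod p L :=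
          Int.toNat_of_nonneg h0
        have hn0 : (PySem.Int.mod p L).toNat < L.toNat := by omega
        have hchars : ∀ k : Nat, fkpChars ((p, some s) :: rest) L (k : Int) =
            if k = (PySem.Int.mod p L).toNat then s :: fkpChars rest L (k : Int)
            else fkpChars rest L (k : Int) := by
          intro k
          rw [fkpChars_cons_char _ _ _ _ _ (by simpa using hs')]
          by_cases hk : k = (PySem.Int.mod p L).toNat
          · rw [if_pos (by omega), if_pos hk]
          · rw [if_neg (by omega), if_neg hk]
        cases hkc : PySem.List.pyGetD kc (PySem.Int.mod p L) none with
        | none =>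
          have hscan : fkpScan L ((p, some s) :: rest) kc =
              fkpScan L rest (PySem.List.pySetD kc (PySem.Int.mod p L) (some s)) := by
            simp [fkpScan, hs', hkc]
          have hih := ih (PySem.List.pySetD kc (PySem.Int.mod p L) (some s))
            (by rw [PySem.List.length_pySetD]; exact hlen)
          have hpoint : ∀ k : Nat, k < L.toNat →
              fkpMerge (PySem.List.pyGetD kc (k : Int) none) (fkpChars ((p, some s) :: rest) L (k : Int))
              = fkpMerge (PySem.List.pyGetD (PySem.List.pySetD kc (PySem.Int.mod p L) (some s)) (k : Int) none)
                  (fkpChars rest L (k : Int)) := by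
            intro k hk
            have hset : PySem.List.pyGetD (PySem.List.pySetD kc (PySem.Int.mod p L) (some s)) (k : Int) none
                = if k = (PySem.Int.mod p L).toNat then some s
                  else PySem.List.pyGetD kc (k : Int) none := by
              rw [← hcast, PySem.List.pyGetD_pySetD_natCast kc _ k _ _ (by omega)]
              rw [Int.toNat_natCast]
            rw [hchars k, hset]
            by_cases hk0 : k = (PySem.Int.mod p L).toNat
            · have hkcn : PySem.List.pyGetD kc (k : Int) none = none := by
                rw [hk0, hcast]; exact hkc
              rw [if_pos hk0, if_pos hk0, hkcn]
              simp [fkpMerge]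
            · rw [if_neg hk0, if_neg hk0]
          constructor
          · rw [hscan, hih.1]
            exact forall_congr' fun k => forall_congr' fun hk => by rw [hpoint k hk]
          · intro h2
            rw [hscan] at h2 ⊢
            rw [hih.2 h2]
            exact List.map_congr_left fun k hk => by
              rw [hpoint k (List.mem_range.mp hk)]
        | some d =>
          by_cases hd : (d == s) = true
          · have hde : d = s := by simpa using hd
            have hscan : fkpScan L ((p, some s) :: rest) kc = fkpScan L rest kc := by
              simp [fkpScan, hs', hkc, hd]
            have hih := ih kc hlen
            have hpoint : ∀ k : Nat, k < L.toNat →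
                fkpMerge (PySem.List.pyGetD kc (k : Int) none) (fkpChars ((p, some s) :: rest) L (k : Int))
                = fkpMerge (PySem.List.pyGetD kc (k : Int) none) (fkpChars rest L (k : Int)) := by
              intro k hk
              rw [hchars k]
              by_cases hk0 : k = (PySem.Int.mod p L).toNat
              · have hkcd : PySem.List.pyGetD kc (k : Int) none = some d := by
                  rw [hk0, hcast]; exact hkc
                rw [if_pos hk0, hkcd]
                simp [fkpMerge, hde]
              · rw [if_neg hk0]
            constructor
            · rw [hscan, hih.1]
              exact forall_congr' fun k => forall_congr' fun hk => by rw [hpoint k hk]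
            · intro h2
              rw [hscan] at h2 ⊢
              rw [hih.2 h2]
              exact List.map_congr_left fun k hk => by
                rw [hpoint k (List.mem_range.mp hk)]
          · have hde : ¬ d = s := by simpa using hd
            have hscan : fkpScan L ((p, some s) :: rest) kc = (kc, false) := by
              simp [fkpScan, hs', hkc, hd]
            rw [hscan]
            constructor
            · simp only [Bool.false_eq_true, false_iff]
              intro hall
              have := hall (PySem.Int.mod p L).toNat hn0
              apply this
              rw [hchars (PySem.Int.mod p L).toNat, if_pos rfl, hcast, hkc]
              simp [fkpMerge, hde]
            · intro h2; cases h2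

-- congruent positions = equal Python residues (positive modulus)
theorem fkpMod_sub (p q L : Int) (hL : 0 < L) :
    PySem.Int.mod (p - q) L = 0 ↔ PySem.Int.mod p L = PySem.Int.mod q L := by
  rw [PySem.Int.mod_eq_zero_iff_dvd, PySem.Int.mod_eq_emod_of_pos hL,
    PySem.Int.mod_eq_emod_of_pos hL]
  exact (Int.dvd_iff_emod_eq_zero).trans Int.emod_eq_emod_iff_emod_sub_eq_zero.symm

-- all-equal lists are Eq-pairwise
theorem fkpAllEq_pairwise (c : String) (t : List String) (h : ∀ x ∈ t, x = c) :
    t.Pairwise Eq := by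
  induction t with
  | nil => exact List.Pairwise.nil
  | cons a s ih =>
    refine List.Pairwise.cons ?_ (ih fun x hx => h x (List.mem_cons_of_mem _ hx))
    intro x hx
    rw [h a (List.mem_cons_self), h x (List.mem_cons_of_mem _ hx)]

theorem fkpPairwiseEq_cons (c : String) (t : List String) :
    (c :: t).Pairwise Eq ↔ ∀ x ∈ t, c = x := by
  constructor
  · intro h; exact (List.pairwise_cons.mp h).1
  · intro h
    exact List.pairwise_cons.mpr ⟨h, fkpAllEq_pairwise c t fun x hx => (h x hx).symm⟩

-- A's class merge succeeds exactly on Eq-pairwise classes, and then holds the head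
theorem fkpMerge_ne_none_iff (l : List String) :
    fkpMerge none l ≠ none ↔ l.Pairwise Eq := by
  cases l with
  | nil => simp [fkpMerge]
  | cons c t =>
    rw [fkpMerge_none_cons, fkpPairwiseEq_cons]
    by_cases h : (t.all fun x => x == c) = true
    · simp only [if_pos h, ne_eq, reduceCtorEq, not_false_eq_true, true_iff]
      intro x hx
      exact (beq_iff_eq.mp (List.all_eq_true.mp h x hx)).symm
    · rw [if_neg h]
      simp only [ne_eq, not_true_eq_false, false_iff, not_forall]
      obtain ⟨x, hx, hxc⟩ : ∃ x ∈ t, ¬ (x == c) = true := by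
        by_contra hc
        exact h (List.all_eq_true.mpr fun x hx => by
          by_contra hb; exact hc ⟨x, hx, hb⟩)
      exact ⟨x, hx, fun he => hxc (by simp [← he])⟩

theorem fkpMerge_getD (l : List String) (h : l.Pairwise Eq) :
    (fkpMerge none l).getD none = l.head? := by
  cases l with
  | nil => rfl
  | cons c t =>
    rw [fkpMerge_none_cons, if_pos]
    · rfl
    · exact List.all_eq_true.mpr fun x hx =>
        beq_iff_eq.mpr ((fkpPairwiseEq_cons c t).mp h x hx).symm

-- membership in a residue class
theorem fkpMem_cls (entries : List (Int × String)) (L r : Int) (x : String) :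
    x ∈ fkpCls entries L r ↔ ∃ q ∈ entries, PySem.Int.mod q.1 L = r ∧ q.2 = x := by
  simp only [fkpCls, List.mem_filterMap]
  constructor
  · rintro ⟨q, hq, hx⟩
    by_cases h : PySem.Int.mod q.1 L = r
    · rw [if_pos h] at hx
      exact ⟨q, hq, h, Option.some_inj.mp hx⟩
    · rw [if_neg h] at hx; cases hx
  · rintro ⟨q, hq, h, hx⟩
    exact ⟨q, hq, by rw [if_pos h, hx]⟩

-- residue classes outside [0, L) are empty
theorem fkpCls_empty (entries : List (Int × String)) (L r : Int) (hL : 0 < L)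
    (hr : ¬ (0 ≤ r ∧ r < L)) : fkpCls entries L r = [] := by
  rw [fkpCls, List.filterMap_eq_nil_iff]
  intro pc _
  rw [if_neg]
  intro he
  have := PySem.Int.mod_nonneg pc.1 hL
  have := PySem.Int.mod_lt pc.1 hL
  omega

-- B's precomputed conflict differences clear L iff every residue class is Eq-pairwise
theorem fkpConflicts_iff (L : Int) (hL : 0 < L) (entries : List (Int × String)) :
    (fkpConflicts entries).any (fun d => PySem.Int.mod d L == 0) = false ↔
      ∀ r : Int, (fkpCls entries L r).Pairwise Eq := by
  induction entries with
  | nil =>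
    simp only [fkpConflicts, List.any_nil, true_iff]
    intro r
    simp [fkpCls]
  | cons a t ih =>
    obtain ⟨p, c⟩ := a
    have hcls : ∀ r : Int, fkpCls ((p, c) :: t) L r =
        if PySem.Int.mod p L = r then c :: fkpCls t L r else fkpCls t L r := by
      intro r
      by_cases h : PySem.Int.mod p L = r
      · simp [fkpCls, h]
      · simp [fkpCls, h]
    have hsplit : (fkpConflicts ((p, c) :: t)).any (fun d => PySem.Int.mod d L == 0) = false ↔
        ((∀ q ∈ t, PySem.Int.mod (p - q.1) L = 0 → q.2 = c) ∧
         (fkpConflicts t).any (fun d => PySem.Int.mod d L == 0) = false) := by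
      show ((t.filterMap (fun q => if c == q.2 then none else some (p - q.1)) ++
        fkpConflicts t).any _ = false) ↔ _
      rw [List.any_append, Bool.or_eq_false_iff]
      constructor
      · rintro ⟨h1, h2⟩
        refine ⟨?_, h2⟩
        intro q hq hcong
        by_contra hne
        have hmem : (p - q.1) ∈ t.filterMap (fun q => if c == q.2 then none else some (p - q.1)) :=
          List.mem_filterMap.mpr ⟨q, hq, by rw [if_neg (by simpa using fun he => hne he.symm)]⟩
        exact List.any_eq_false.mp h1 _ hmem (by simp [hcong])
      · rintro ⟨h1, h2⟩
        refine ⟨List.any_eq_false.mpr ?_, h2⟩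
        intro d hd
        obtain ⟨q, hq, hqd⟩ := List.mem_filterMap.mp hd
        by_cases hce : c == q.2
        · rw [if_pos hce] at hqd; cases hqd
        · rw [if_neg hce] at hqd
          obtain rfl : p - q.1 = d := Option.some_inj.mp hqd
          intro hcong
          exact (show ¬ c = q.2 by simpa using hce) (h1 q hq (by simpa using hcong)).symm
    rw [hsplit]
    constructor
    · rintro ⟨h1, h2⟩ r
      have ht := ih.mp h2
      rw [hcls r]
      by_cases hr : PySem.Int.mod p L = r
      · rw [if_pos hr, fkpPairwiseEq_cons]
        intro x hx
        obtain ⟨q, hq, hqr, hqx⟩ := (fkpMem_cls t L r x).mp hx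
        have hcong : PySem.Int.mod (p - q.1) L = 0 :=
          (fkpMod_sub p q.1 L hL).mpr (by rw [hr, hqr])
        rw [← hqx]
        exact (h1 q hq hcong).symm
      · rw [if_neg hr]; exact ht r
    · intro h
      constructor
      · intro q hq hcong
        have hr := (fkpMod_sub p q.1 L hL).mp hcong
        have hp := h (PySem.Int.mod p L)
        rw [hcls _, if_pos rfl, fkpPairwiseEq_cons] at hp
        exact (hp q.2 ((fkpMem_cls t L _ q.2).mpr ⟨q, hq, hr.symm, rfl⟩)).symm
      · apply ih.mpr
        intro r
        have := h r
        rw [hcls r] at this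
        by_cases hr : PySem.Int.mod p L = r
        · rw [if_pos hr] at this
          exact (List.pairwise_cons.mp this).2
        · rwa [if_neg hr] at this

-- the representative lookup reads the head of the residue class
theorem fkpFind (entries : List (Int × String)) (L r : Int) :
    (entries.find? (fun pc => PySem.Int.mod pc.1 L == r)).map Prod.snd
      = (fkpCls entries L r).head? := by
  induction entries with
  | nil => rfl
  | cons a t ih =>
    by_cases h : PySem.Int.mod a.1 L = r
    · rw [List.find?_cons_of_pos (by simp [h])]
      simp [fkpCls, h]
    · rw [List.find?_cons_of_neg (by simp [h])]
      have hcls : fkpCls (a :: t) L r = fkpCls t L r := by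
        simp [fkpCls, h]
      rw [hcls]
      exact ih

-- collecting over a list of residues succeeds iff every class is inhabited
theorem fkpCollect_eq (entries : List (Int × String)) (L : Int) (rs : List Int) :
    fkpCollect entries L rs =
      if ∀ r ∈ rs, fkpCls entries L r ≠ [] then
        some (rs.map (fun r => (fkpCls entries L r).head?.getD ""))
      else none := by
  induction rs with
  | nil => simp [fkpCollect]
  | cons r rs ih =>
    simp only [fkpCollect]
    cases hf : entries.find? (fun pc => PySem.Int.mod pc.1 L == r) with
    | none =>
      have : (fkpCls entries L r).head? = none := by rw [← fkpFind, hf]; rfl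
      have hnil : fkpCls entries L r = [] := List.head?_eq_none_iff.mp this
      rw [if_neg]
      intro hall
      exact hall r List.mem_cons_self hnil
    | some pc =>
      have hhd : (fkpCls entries L r).head? = some pc.2 := by rw [← fkpFind, hf]; rfl
      have hne : fkpCls entries L r ≠ [] := by
        intro h; rw [h] at hhd; cases hhd
      rw [ih]
      by_cases hall : ∀ r' ∈ rs, fkpCls entries L r' ≠ []
      · rw [if_pos hall, if_pos (by
          intro r' hr'
          rcases List.mem_cons.mp hr' with h | h
          · rwa [h]
          · exact hall r' h)]
        simp [hhd]
      · rw [if_neg hall, if_neg (by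
          intro hc
          exact hall fun r' hr' => hc r' (List.mem_cons_of_mem _ hr'))]
        rfl

-- one iteration of the outer loop: A's body equals B's body for every key length L ≥ 1
theorem fkpPerL (items : List (Int × Option String)) (pats : List String) (L : Int) (hL : 0 < L) :
    (if (fkpScan L items (List.replicate L.toNat none)).2 &&
        (fkpScan L items (List.replicate L.toNat none)).1.all (fun k => k.isSome) then
       pats ++ [PySem.Str.join "" ((fkpScan L items (List.replicate L.toNat none)).1.map (fun k => k.getD ""))]
     else pats)
    = (if (fkpConflicts (fkpEntries items)).any (fun d => PySem.Int.mod d L == 0) then pats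
       else
         match fkpCollect (fkpEntries items) L (PySem.List.pyRange 0 L 1) with
         | some chars => pats ++ [PySem.Str.join "" chars]
         | none => pats) := by
  obtain ⟨h1, h2⟩ := fkpScan_spec L hL items (List.replicate L.toNat none) (by simp)
  -- A's scan, residue by residue, over the initial all-None array
  have h1' : (fkpScan L items (List.replicate L.toNat none)).2 = true ↔
      ∀ k : Nat, k < L.toNat → (fkpCls (fkpEntries items) L (k : Int)).Pairwise Eq := by
    rw [h1]
    refine forall_congr' fun k => forall_congr' fun hk => ?_
    rw [fkpGet_replicate L.toNat k _ _ hk, fkpChars_eq_cls, fkpMerge_ne_none_iff]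
  have hrange : ∀ r : Int, r ∈ PySem.List.pyRange 0 L 1 ↔ 0 ≤ r ∧ r < L := by
    intro r
    simp [PySem.List.mem_pyRange_one]
  by_cases hp : (fkpScan L items (List.replicate L.toNat none)).2 = true
  · have hpw := h1'.mp hp
    have hpwAll : ∀ r : Int, (fkpCls (fkpEntries items) L r).Pairwise Eq := by
      intro r
      by_cases hr : 0 ≤ r ∧ r < L
      · have : r = ((r.toNat : Nat) : Int) := (Int.toNat_of_nonneg hr.1).symm
        rw [this]
        exact hpw r.toNat (by omega)
      · rw [fkpCls_empty _ _ _ hL hr]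
        exact List.Pairwise.nil
    have hOK : (fkpConflicts (fkpEntries items)).any (fun d => PySem.Int.mod d L == 0) = false :=
      (fkpConflicts_iff L hL (fkpEntries items)).mpr hpwAll
    have hval : (fkpScan L items (List.replicate L.toNat none)).1
        = (List.range L.toNat).map (fun (k : Nat) => (fkpCls (fkpEntries items) L (k : Int)).head?) := by
      rw [h2 hp]
      apply List.map_congr_left
      intro k hk
      rw [fkpGet_replicate L.toNat k _ _ (List.mem_range.mp hk), fkpChars_eq_cls,
        fkpMerge_getD _ (hpw k (List.mem_range.mp hk))]
    have hAall : (fkpScan L items (List.replicate L.toNat none)).1.all (fun k => k.isSome)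
        = decide (∀ k : Nat, k < L.toNat → fkpCls (fkpEntries items) L (k : Int) ≠ []) := by
      rw [hval, List.all_map]
      by_cases hall : ∀ k : Nat, k < L.toNat → fkpCls (fkpEntries items) L (k : Int) ≠ []
      · rw [decide_eq_true hall]
        apply List.all_eq_true.mpr
        intro k hk
        have := hall k (List.mem_range.mp hk)
        simp only [Function.comp_apply]
        rwa [Option.isSome_iff_ne_none, ne_eq, List.head?_eq_none_iff]
      · rw [decide_eq_false hall]
        apply Bool.eq_false_iff.mpr
        intro hc
        apply hall
        intro k hk
        have := List.all_eq_true.mp hc k (List.mem_range.mpr hk)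
        simp only [Function.comp_apply] at this
        rwa [Option.isSome_iff_ne_none, ne_eq, List.head?_eq_none_iff] at this
    rw [hp, Bool.true_and, hAall, hOK, if_neg (show ¬ (false = true) by simp), fkpCollect_eq]
    by_cases hall : ∀ k : Nat, k < L.toNat → fkpCls (fkpEntries items) L (k : Int) ≠ []
    · have hall' : ∀ r ∈ PySem.List.pyRange 0 L 1, fkpCls (fkpEntries items) L r ≠ [] := by
        intro r hr
        obtain ⟨hr0, hrL⟩ := (hrange r).mp hr
        have : r = ((r.toNat : Nat) : Int) := (Int.toNat_of_nonneg hr0).symm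
        rw [this]
        exact hall r.toNat (by omega)
      rw [decide_eq_true hall, if_pos rfl, if_pos hall']
      have hmap : (List.range L.toNat).map ((fun k => k.getD "") ∘ fun k : Nat =>
            (fkpCls (fkpEntries items) L ((k : Nat) : Int)).head?)
          = (List.range ((L - 0).toNat)).map ((fun r => (fkpCls (fkpEntries items) L r).head?.getD "")
            ∘ fun k : Nat => ((0 : Int) + k)) := by
        rw [Int.sub_zero]
        apply List.map_congr_left
        intro k hk
        simp
      rw [hval, List.map_map, PySem.List.pyRange_one, List.map_map, hmap]
    · have hall' : ¬ ∀ r ∈ PySem.List.pyRange 0 L 1, fkpCls (fkpEntries items) L r ≠ [] := by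
        intro hc
        apply hall
        intro k hk
        exact hc (k : Int) ((hrange _).mpr (by omega))
      rw [decide_eq_false hall, if_neg (by simp), if_neg hall']
  · have hp' : (fkpScan L items (List.replicate L.toNat none)).2 = false :=
      Bool.eq_false_iff.mpr hp
    obtain ⟨k, hk, hknp⟩ : ∃ k : Nat, k < L.toNat ∧
        ¬ (fkpCls (fkpEntries items) L (k : Int)).Pairwise Eq := by
      by_contra h
      simp only [not_exists, not_and, not_not] at h
      exact hp (h1'.mpr fun k hk => h k hk)
    have hOK : (fkpConflicts (fkpEntries items)).any (fun d => PySem.Int.mod d L == 0) = true := by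
      by_contra hc
      exact hknp ((fkpConflicts_iff L hL (fkpEntries items)).mp (Bool.eq_false_iff.mpr hc) (k : Int))
    rw [hp', Bool.false_and, if_neg (by simp), hOK, if_pos rfl]

-- ===== VERDICT (by name: the statement is the Claim_ definition above) =====
theorem find_key_pattern_spec : Claim_equal_find_key_pattern := by
  intro key_needed_at_pos max_len _
  unfold Spec_find_key_pattern find_key_pattern find_key_pattern_alt
  apply PySem.List.foldl_congr_mem
  intro pats L hmem
  have hL : 0 < L := by
    have := (PySem.List.mem_pyRange_one.mp hmem).1
    omega
  exact fkpPerL (PySem.Dict.ofList key_needed_at_pos).items pats L hL
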